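-- pv_equiv track=rewrite | github.com/staitz/kbo_stats_BE | be/api/views.py | _descending_tens_candidates
-- ===== SOURCE A (Python) =====
-- def _descending_tens_candidates(base_value: int, floor: int = 0) -> list[int]:
--     base_value = max(base_value, floor)
--     candidates: list[int] = [base_value]
--
--     rounded = (base_value // 10) * 10
--     if rounded >= base_value:
--         rounded -= 10
--
--     while rounded >= floor:
--         candidates.append(rounded)
--         rounded -= 10
--
--     if candidates[-1] != floor:
--         candidates.append(floor)
--
--     dedup: list[int] = []
--     for candidate in candidates:
--         if candidate not in dedup:
--             dedup.append(candidate)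
--     return dedup
-- ===== SOURCE B (Python) =====
-- def _descending_tens_candidates(base_value: int, floor: int = 0) -> list[int]:
--     base_value = max(base_value, floor)
--     start = (base_value // 10) * 10
--     if start >= base_value:
--         start -= 10
--     values = {base_value, floor}
--     values.update(range(start, floor - 1, -10))
--     return sorted(values, reverse=True)
-- ===== Notes on version B (the rewrite author's own statement) =====
-- stated objective: simpler
-- what changed: A builds the list in order with a while loop, a conditional floor append and a quadratic 'not in' dedup scan; B builds a set {base, floor} plus a range of tens and recovers the descending order with one sorted(..., reverse=True) pass.
import Mathlib
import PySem

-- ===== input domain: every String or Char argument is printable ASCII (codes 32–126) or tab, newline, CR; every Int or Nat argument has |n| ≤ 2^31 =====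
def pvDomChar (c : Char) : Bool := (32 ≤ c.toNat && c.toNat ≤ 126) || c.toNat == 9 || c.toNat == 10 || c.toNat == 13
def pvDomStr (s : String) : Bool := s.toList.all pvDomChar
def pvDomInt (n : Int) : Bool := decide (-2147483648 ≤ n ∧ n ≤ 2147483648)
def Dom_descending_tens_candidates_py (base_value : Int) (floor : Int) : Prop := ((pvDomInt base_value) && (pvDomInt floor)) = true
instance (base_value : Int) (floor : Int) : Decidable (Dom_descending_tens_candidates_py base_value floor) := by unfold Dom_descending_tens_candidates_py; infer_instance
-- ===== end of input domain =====

-- B replaces A's append-loop plus quadratic in-order dedup scan by a set {base, floor} ∪ range(start, floor-1, -10)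
-- followed by one sorted(..., reverse=True) pass (simpler: the order comes from the sort, not from the construction).

-- ===== PORT A =====
-- A's while loop: append `rounded`, step down by 10, while rounded >= floor
def pvALoop (floor : Int) (rounded : Int) (acc : List Int) : List Int :=
  if rounded ≥ floor then pvALoop floor (rounded - 10) (acc ++ [rounded]) else acc
termination_by (rounded - floor + 10).toNat
decreasing_by omega

def descending_tens_candidates_py (base_value : Int) (floor : Int) : List Int :=
  let base_value := max base_value floor
  let candidates : List Int := [base_value]
  let rounded := PySem.Int.floordiv base_value 10 * 10
  let rounded := if rounded ≥ base_value then rounded - 10 else rounded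
  let candidates := pvALoop floor rounded candidates
  let candidates := if PySem.List.pyGet? candidates (-1) ≠ some floor then candidates ++ [floor] else candidates
  candidates.foldl (fun dedup c => if c ∈ dedup then dedup else dedup ++ [c]) []

-- ===== PORT B =====
def descending_tens_candidates_py_alt (base_value : Int) (floor : Int) : List Int :=
  let base_value := max base_value floor
  let start := PySem.Int.floordiv base_value 10 * 10
  let start := if start ≥ base_value then start - 10 else start
  let values : PySem.Set Int := PySem.Set.add (PySem.Set.add PySem.Set.empty base_value) floor
  let values := PySem.Set.update values (PySem.List.pyRange start (floor - 1) (-10))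
  PySem.List.sorted values (fun x => x) true

-- ===== PRECONDITION & SPEC =====
def Spec_descending_tens_candidates_py (base_value : Int) (floor : Int) (out : List Int) : Prop := out = descending_tens_candidates_py_alt base_value floor
instance (base_value : Int) (floor : Int) (out : List Int) : Decidable (Spec_descending_tens_candidates_py base_value floor out) := by unfold Spec_descending_tens_candidates_py; infer_instance

-- ===== CLAIM (what is proved, stated in full; the proofs are below) =====
def Claim_equal_descending_tens_candidates_py : Prop := ∀ (base_value : Int) (floor : Int), Dom_descending_tens_candidates_py base_value floor → Spec_descending_tens_candidates_py base_value floor (descending_tens_candidates_py base_value floor)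

-- ===== LEMMAS AND PROOFS =====

-- the list A's while loop appends: rounded, rounded-10, ... while ≥ floor
def pvD (floor : Int) (r : Int) : List Int :=
  if r ≥ floor then r :: pvD floor (r - 10) else []
termination_by (r - floor + 10).toNat
decreasing_by omega

lemma pvALoop_eq (floor r : Int) : ∀ acc : List Int, pvALoop floor r acc = acc ++ pvD floor r := by
  fun_induction pvD floor r with
  | case1 r h ih =>
      intro acc
      rw [pvALoop, if_pos h, ih, pvD]
      simp
  | case2 r h =>
      intro acc
      rw [pvALoop, if_neg h]
      simp

lemma mem_pvD (floor r x : Int) : x ∈ pvD floor r ↔ floor ≤ x ∧ x ≤ r ∧ (10:Int) ∣ r - x := by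
  fun_induction pvD floor r with
  | case1 r h ih => simp only [List.mem_cons, ih]; omega
  | case2 r h => simp only [List.not_mem_nil, false_iff]; omega

lemma pairwise_pvD (floor r : Int) : (pvD floor r).Pairwise (fun a b => b < a) := by
  fun_induction pvD floor r with
  | case1 r h ih =>
      refine List.Pairwise.cons ?_ ih
      intro y hy
      have := (mem_pvD floor (r - 10) y).mp hy
      omega
  | case2 r h => exact List.Pairwise.nil

lemma pv_getLast?_cons (a : Int) (l : List Int) (h : l ≠ []) : (a :: l).getLast? = l.getLast? := by
  cases l with
  | nil => exact absurd rfl h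
  | cons b t => simp [List.getLast?_cons_cons]

lemma pvD_eq_nil_iff (floor r : Int) : pvD floor r = [] ↔ r < floor := by
  rw [pvD]; split <;> simp <;> omega

lemma pvD_getLast (floor r L : Int) (h : (pvD floor r).getLast? = some L) :
    floor ≤ L ∧ L < floor + 10 ∧ (10:Int) ∣ r - L := by
  fun_induction pvD floor r with
  | case1 r hge ih =>
      by_cases hnil : pvD floor (r - 10) = []
      · rw [hnil] at h
        simp at h
        have : r - 10 < floor := (pvD_eq_nil_iff floor (r - 10)).mp hnil
        subst h; omega
      · rw [pv_getLast?_cons _ _ hnil] at h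
        have := ih h
        omega
  | case2 r hge => simp at h

lemma foldl_dedup_eq (l : List Int) : ∀ acc : List Int, (∀ x ∈ l, x ∉ acc) → l.Nodup →
    l.foldl (fun dedup c => if c ∈ dedup then dedup else dedup ++ [c]) acc = acc ++ l := by
  induction l with
  | nil => simp
  | cons a t ih =>
      intro acc hdisj hnd
      have ha : a ∉ acc := hdisj a (by simp)
      simp only [List.foldl_cons, if_neg ha]
      rw [ih (acc ++ [a])]
      · simp
      · intro x hx
        simp only [List.mem_append, List.mem_singleton]
        rintro (hmem | rfl)
        · exact hdisj x (by simp [hx]) hmem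
        · exact (List.nodup_cons.mp hnd).1 hx
      · exact (List.nodup_cons.mp hnd).2

theorem pv_main (b f : Int) :
    descending_tens_candidates_py b f = descending_tens_candidates_py_alt b f := by
  unfold descending_tens_candidates_py descending_tens_candidates_py_alt
  simp only []
  set bv := max b f with hbv
  have hbf : f ≤ bv := le_max_right _ _
  set s0 := PySem.Int.floordiv bv 10 * 10 with hs0
  have hs0le : s0 ≤ bv := by
    have h1 := PySem.Int.floordiv_mul_add_mod bv 10
    have h2 := PySem.Int.mod_nonneg bv (b := 10) (by norm_num)
    omega
  set r0 : Int := if s0 ≥ bv then s0 - 10 else s0 with hr0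
  have hr0lt : r0 < bv := by rw [hr0]; split <;> omega
  -- the candidates list after the while loop and the possible floor append
  rw [pvALoop_eq]
  set D := pvD f r0 with hD
  set c1 : List Int := [bv] ++ D with hc1
  have hc1cons : c1 = bv :: D := by simp [hc1]
  set ys : List Int := if PySem.List.pyGet? c1 (-1) ≠ some f then c1 ++ [f] else c1 with hys
  -- membership and order facts about ys
  have hmemD : ∀ x, x ∈ D ↔ f ≤ x ∧ x ≤ r0 ∧ (10:Int) ∣ r0 - x := fun x => mem_pvD f r0 x
  have hlast : PySem.List.pyGet? c1 (-1) = c1.getLast? := PySem.List.pyGet?_neg_one c1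
  have hys_mem : ∀ x, x ∈ ys ↔ x = bv ∨ x = f ∨ x ∈ D := by
    intro x
    rw [hys]
    split
    · simp [hc1cons]; tauto
    · rename_i hcond
      rw [not_not] at hcond
      rw [hlast] at hcond
      have hfmem : f ∈ c1 := List.mem_of_getLast? hcond
      simp only [hc1cons, List.mem_cons] at hfmem ⊢
      constructor
      · tauto
      · rintro (rfl | rfl | hx) <;> tauto
  have hys_pw : ys.Pairwise (fun a b => b < a) := by
    have hpwc1 : c1.Pairwise (fun a b => b < a) := by
      rw [hc1cons]
      refine List.Pairwise.cons ?_ (pairwise_pvD f r0)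
      intro y hy
      have := (hmemD y).mp hy
      omega
    rw [hys]
    split
    · rename_i hcond
      rw [hlast] at hcond
      -- every element of c1 is > f
      have hgt : ∀ y ∈ c1, f < y := by
        by_cases hnil : D = []
        · intro y hy
          simp [hc1cons, hnil] at hy
          subst hy
          have : c1.getLast? = some bv := by simp [hc1cons, hnil]
          rw [this] at hcond
          simp at hcond
          omega
        · have hlastD : c1.getLast? = D.getLast? := by
            rw [hc1cons, pv_getLast?_cons _ _ hnil]
          obtain ⟨L, hL⟩ := List.getLast?_isSome.mpr hnil |> Option.isSome_iff_exists.mp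
          have hLp := pvD_getLast f r0 L hL
          have hLne : L ≠ f := by
            intro hEq
            rw [hlastD, hL, hEq] at hcond
            simp at hcond
          have hr0f : f ≤ r0 := by
            rcases (hmemD L).mp (List.mem_of_getLast? hL) with ⟨_, h2, _⟩
            omega
          intro y hy
          rw [hc1cons, List.mem_cons] at hy
          rcases hy with rfl | hy
          · omega
          · have hyp := (hmemD y).mp hy
            -- y = f would force L = f
            rcases hyp with ⟨h1, h2, h3⟩
            rcases hLp with ⟨l1, l2, l3⟩
            by_cases hyf : y = f
            · subst hyf; omega
            · omega
      rw [List.pairwise_append]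
      refine ⟨hpwc1, by simp, ?_⟩
      intro y hy z hz
      simp at hz
      subst hz
      exact hgt y hy
    · exact hpwc1
  have hys_nd : ys.Nodup := List.Pairwise.imp (fun h => LT.lt.ne' h) hys_pw
  -- left side: the dedup scan is the identity on ys
  rw [foldl_dedup_eq ys [] (by simp) hys_nd, List.nil_append]
  -- right side: sorted(values, reverse=True) = ys
  have hvals_nd : List.Nodup (PySem.Set.update (PySem.Set.add (PySem.Set.add PySem.Set.empty bv) f) (PySem.List.pyRange r0 (f - 1) (-10))) := by
    apply PySem.Set.nodup_update
    apply PySem.Set.nodup_add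
    apply PySem.Set.nodup_add
    simp [PySem.Set.empty]
  have hvals_mem : ∀ x, x ∈ PySem.Set.update (PySem.Set.add (PySem.Set.add PySem.Set.empty bv) f) (PySem.List.pyRange r0 (f - 1) (-10)) ↔ x = bv ∨ x = f ∨ x ∈ D := by
    intro x
    rw [PySem.Set.mem_update, PySem.Set.mem_add, PySem.Set.mem_add,
        PySem.List.mem_pyRange_iff_of_neg (by norm_num : (-10:Int) < 0), hmemD]
    simp [PySem.Set.empty]
    omega
  apply Eq.symm
  apply PySem.List.sorted_rev_eq_of_perm_of_pairwise_gt
  · rw [List.perm_ext_iff_of_nodup hys_nd hvals_nd]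
    intro x
    rw [hys_mem x, hvals_mem x]
  · exact hys_pw

-- ===== VERDICT (by name: the statement is the Claim_ definition above) =====
theorem descending_tens_candidates_py_spec : Claim_equal_descending_tens_candidates_py := by
  intro b f _
  exact pv_main b f
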